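-- pv_equiv track=rewrite | github.com/venantvr-security/Python.PHP.Sec.Scan | utils/deduplicator.py | group_by_similarity
-- ===== SOURCE A (Python) =====
-- from typing import List, Dict, Any, Set
--
-- def group_by_similarity(vulnerabilities: List[Dict[str, Any]]) -> Dict[str, List[Dict[str, Any]]]:
--     """
--     Group similar vulnerabilities together.
--
--     Groups by type + sink function.
--     """
--     groups: Dict[str, List[Dict[str, Any]]] = {}
--
--     for vuln in vulnerabilities:
--         key = f"{vuln['type']}:{vuln.get('sink', 'unknown')}"
--
--         if key not in groups:
--             groups[key] = []
--
--         groups[key].append(vuln)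
--
--     return groups
-- ===== SOURCE B (Python) =====
-- def group_by_similarity(vulnerabilities):
--     """
--     Group similar vulnerabilities together (by type + sink function).
--
--     Different decomposition from the original single hash-accumulation pass:
--     build the ordered list of distinct keys first, then produce each group
--     with one filter pass over the input.
--     """
--     def key(v):
--         return f"{v['type']}:{v.get('sink', 'unknown')}"
--
--     return {k: [v for v in vulnerabilities if key(v) == k]
--             for k in dict.fromkeys(key(v) for v in vulnerabilities)}
-- ===== Notes on version B (the rewrite author's own statement) =====
-- stated objective: alternative
-- what changed: Replaces the single hash-accumulation pass (create-empty-then-append into a dict) by a two-phase strategy: first compute the ordered deduplicated key list via dict.fromkeys, then build each group by filtering the whole input per key.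
import Mathlib
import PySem

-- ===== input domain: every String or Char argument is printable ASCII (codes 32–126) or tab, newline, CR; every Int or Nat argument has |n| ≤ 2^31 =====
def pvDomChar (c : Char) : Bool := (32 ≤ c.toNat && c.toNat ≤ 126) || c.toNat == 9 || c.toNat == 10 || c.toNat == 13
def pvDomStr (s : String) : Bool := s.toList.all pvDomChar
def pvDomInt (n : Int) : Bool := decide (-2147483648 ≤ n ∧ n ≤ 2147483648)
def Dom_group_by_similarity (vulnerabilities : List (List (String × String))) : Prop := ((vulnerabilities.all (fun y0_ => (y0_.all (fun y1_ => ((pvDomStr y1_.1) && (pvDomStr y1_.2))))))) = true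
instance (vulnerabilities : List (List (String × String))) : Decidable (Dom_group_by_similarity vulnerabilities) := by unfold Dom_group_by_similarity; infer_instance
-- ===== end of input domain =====

-- B groups by building the ordered distinct-key list first and filtering the input once per key,
-- instead of A's single dict-accumulation pass; return values agree (same dict, same key order).


-- ===== PORT A =====
-- shared input decoding: the key f"{vuln['type']}:{vuln.get('sink', 'unknown')}" computed by both
-- Pythons (the "" default for 'type' is only reachable outside Pre_, where Python raises KeyError)
def pvVKey (vuln : List (String × String)) : String :=
  (PySem.Dict.ofList vuln).getD "type" "" ++ ":" ++ (PySem.Dict.ofList vuln).getD "sink" "unknown"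

def group_by_similarity (vulnerabilities : List (List (String × String))) : List (String × List (List (String × String))) :=
  (vulnerabilities.foldl
    (fun groups vuln =>
      let key := pvVKey vuln
      let groups := if groups.contains key then groups else groups.insert key ([] : List (List (String × String)))
      groups.modify key [] (fun l => l ++ [vuln]))
    PySem.Dict.empty).items

-- ===== PORT B =====
def group_by_similarity_alt (vulnerabilities : List (List (String × String))) : List (String × List (List (String × String))) :=
  (PySem.List.dedup (vulnerabilities.map pvVKey)).map
    (fun k => (k, vulnerabilities.filter (fun v => pvVKey v == k)))

-- ===== PRECONDITION & SPEC =====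
-- Pre_ excludes exactly the inputs where vuln['type'] raises KeyError (a vuln without a 'type' key)
def Pre_group_by_similarity (vulnerabilities : List (List (String × String))) : Prop :=
  ∀ v ∈ vulnerabilities, (PySem.Dict.ofList v).contains "type" = true
instance (vulnerabilities : List (List (String × String))) : Decidable (Pre_group_by_similarity vulnerabilities) := by unfold Pre_group_by_similarity; infer_instance

def pvWitness_group_by_similarity : (List (List (String × String))) :=
  [[("type", "xss"), ("sink", "echo")], [("type", "xss"), ("sink", "echo")], [("type", "sqli")]]

def Spec_group_by_similarity (vulnerabilities : List (List (String × String))) (out : List (String × List (List (String × String)))) : Prop := out = group_by_similarity_alt vulnerabilities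
instance (vulnerabilities : List (List (String × String))) (out : List (String × List (List (String × String)))) : Decidable (Spec_group_by_similarity vulnerabilities out) := by unfold Spec_group_by_similarity; infer_instance

-- ===== CLAIM (what is proved, stated in full; the proofs are below) =====
def Claim_equal_group_by_similarity : Prop := ∀ (vulnerabilities : List (List (String × String))), Dom_group_by_similarity vulnerabilities → Pre_group_by_similarity vulnerabilities → Spec_group_by_similarity vulnerabilities (group_by_similarity vulnerabilities)

-- ===== LEMMAS AND PROOFS =====

-- A's loop body ('if key not in groups: groups[key] = []' then append) is one dict.modify
theorem pv_stepA_eq (d : PySem.Dict String (List (List (String × String)))) (v : List (String × String)) :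
    (let key := pvVKey v
     let groups := if d.contains key then d else d.insert key ([] : List (List (String × String)))
     groups.modify key [] (fun l => l ++ [v]))
    = d.modify (pvVKey v) [] (fun l => l ++ [v]) := by
  by_cases h : d.contains (pvVKey v)
  · simp [h]
  · have h' : d.contains (pvVKey v) = false := by simpa using h
    simp [h', PySem.Dict.modify, PySem.Dict.getD_insert_self,
      PySem.Dict.insert_insert_self, PySem.Dict.getD_of_not_contains d [] h']

theorem group_by_similarity_spec' (vulnerabilities : List (List (String × String))) :
    group_by_similarity vulnerabilities = group_by_similarity_alt vulnerabilities := by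
  unfold group_by_similarity group_by_similarity_alt
  have hstep : (vulnerabilities.foldl
      (fun groups vuln =>
        let key := pvVKey vuln
        let groups := if groups.contains key then groups else groups.insert key ([] : List (List (String × String)))
        groups.modify key [] (fun l => l ++ [vuln]))
      PySem.Dict.empty)
      = vulnerabilities.foldl (fun d v => d.modify (pvVKey v) [] (fun l => l ++ [v])) PySem.Dict.empty := by
    exact PySem.List.foldl_congr_mem _ _ _ _ (fun d v _ => pv_stepA_eq d v)
  rw [hstep]
  set D := vulnerabilities.foldl (fun d v => d.modify (pvVKey v) [] (fun l => l ++ [v])) PySem.Dict.empty with hD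
  have hkeys : D.keys = PySem.List.dedup (vulnerabilities.map pvVKey) := by
    rw [hD, PySem.Dict.keys_foldl_modify_key vulnerabilities pvVKey [] (fun _ v => fun l => l ++ [v])]
    rw [PySem.List.dedup_eq_ofList]
    simp [PySem.Set.update, PySem.Set.ofList, List.foldl_map, PySem.Dict.keys_empty]
  have hnodup : D.keys.Nodup := by
    rw [hkeys]; rw [PySem.List.dedup_eq_ofList]; exact PySem.Set.nodup_ofList _
  have hgetD : ∀ k, D.getD k [] = vulnerabilities.filter (fun v => pvVKey v == k) := by
    intro k
    have hmap : D = (vulnerabilities.map (fun v => (pvVKey v, v))).foldl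
        (fun d p => d.modify p.1 [] (fun l => l ++ [p.2])) PySem.Dict.empty := by
      rw [hD, List.foldl_map]
    rw [hmap, PySem.Dict.getD_foldl_modify_append]
    simp [List.filter_map, Function.comp_def]
  rw [PySem.Dict.items_eq_map_keys D hnodup [], hkeys]
  exact List.map_congr_left (fun k _ => by rw [hgetD k])

-- ===== VERDICT (by name: the statement is the Claim_ definition above) =====
theorem group_by_similarity_spec : Claim_equal_group_by_similarity := by
  intro vulns _ _
  exact group_by_similarity_spec' vulns
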